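-- pv_equiv track=rewrite | github.com/Rinzlller/projects | AES.py | txt2mx
-- ===== SOURCE A (Python) =====
-- def txt2mx(text: str) -> list:
-- 	massiv = [byte for byte in text.encode()]
-- 	matrix = [[0] * 16 for _ in range((len(massiv) + 15) // 16)]
-- 	for i in range((len(massiv) + 15) // 16):
-- 		for j in range(16):
-- 			if(i * 16 + j < len(massiv)):
-- 				matrix[i][(j * 4) % 16 + j // 4] = massiv[i * 16 + j]
-- 			else:
-- 				matrix[i][(j * 4) % 16 + j // 4] = 16 - len(massiv) % 16
-- 	return matrix
-- ===== SOURCE B (Python) =====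
-- def txt2mx(text: str) -> list:
--     data = list(text.encode())
--     out = []
--     for i in range(0, len(data), 16):
--         chunk = data[i:i + 16]
--         if len(chunk) < 16:
--             pad = 16 - len(chunk)
--             chunk = chunk + [pad] * pad
--         rows = [chunk[0:4], chunk[4:8], chunk[8:12], chunk[12:16]]
--         out.append([row[c] for c in range(4) for row in rows])
--     return out
-- ===== Notes on version B (the rewrite author's own statement) =====
-- stated objective: simpler
-- what changed: A preallocates zero matrices and scatter-writes every cell through the index formula (j*4)%16+j//4; B walks the bytes one 16-byte chunk at a time, pads only a short final chunk, slices the chunk into four 4-byte rows and emits the block as a column-by-column read of those rows, with no preallocation, no mutation and no modular index arithmetic.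
import Mathlib
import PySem

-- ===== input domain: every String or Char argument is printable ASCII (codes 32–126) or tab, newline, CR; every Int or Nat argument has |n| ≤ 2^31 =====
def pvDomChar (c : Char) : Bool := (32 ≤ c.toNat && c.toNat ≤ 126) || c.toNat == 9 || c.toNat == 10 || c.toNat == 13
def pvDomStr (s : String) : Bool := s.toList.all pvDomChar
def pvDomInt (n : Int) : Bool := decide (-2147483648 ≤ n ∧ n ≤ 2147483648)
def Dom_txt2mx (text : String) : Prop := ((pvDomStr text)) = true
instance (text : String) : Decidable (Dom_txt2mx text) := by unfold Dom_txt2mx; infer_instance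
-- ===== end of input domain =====

-- B replaces A's preallocated matrices and per-cell scatter writes (index formula (j*4)%16+j//4)
-- by a chunk-at-a-time walk: pad a short last chunk, slice it into four 4-byte rows, read the
-- block out column by column (objective: simpler).

-- ===== PORT A =====
-- text.encode(): on the ASCII domain each byte equals the character's codepoint.
-- range(n) with n ≥ 0 is List.range; all list indices/writes are provably in range, so getD/set are exact here.
def txt2mx (text : String) : List (List Int) :=
  let massiv : List Int := text.toList.map (fun c => (c.toNat : Int))
  let n : Nat := (massiv.length + 15) / 16
  let matrix : List (List Int) := (List.range n).map (fun _ => List.replicate 16 (0 : Int))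
  (List.range n).foldl (fun matrix i =>
    (List.range 16).foldl (fun matrix j =>
      let v : Int := if i * 16 + j < massiv.length
                     then massiv.getD (i * 16 + j) 0
                     else (16 : Int) - (massiv.length : Int) % 16
      matrix.set i ((matrix.getD i []).set ((j * 4) % 16 + j / 4) v)) matrix) matrix

-- ===== PORT B =====
-- for i in range(0, len(data), 16) is a foldl over PySem.List.pyRange 0 len 16; data[i:i+16] and the
-- chunk[a:b] row slices are PySem.List.slice; [pad]*pad is List.replicate; row[c] with c in range(4)
-- is in range on every row, so getD is exact there.
def txt2mx_alt (text : String) : List (List Int) :=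
  let data : List Int := text.toList.map (fun c => (c.toNat : Int))
  (PySem.List.pyRange 0 (data.length : Int) 16).foldl (fun out i =>
    let chunk0 := PySem.List.slice data (some i) (some (i + 16))
    let chunk := if chunk0.length < 16 then
        chunk0 ++ List.replicate (16 - chunk0.length) ((16 - chunk0.length : Nat) : Int)
      else chunk0
    let rows := [PySem.List.slice chunk (some 0) (some 4), PySem.List.slice chunk (some 4) (some 8),
                 PySem.List.slice chunk (some 8) (some 12), PySem.List.slice chunk (some 12) (some 16)]
    out ++ [(List.range 4).flatMap (fun c => rows.map (fun row => row.getD c 0))]) []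

-- ===== PRECONDITION & SPEC =====
def Spec_txt2mx (text : String) (out : List (List Int)) : Prop := out = txt2mx_alt text
instance (text : String) (out : List (List Int)) : Decidable (Spec_txt2mx text out) := by unfold Spec_txt2mx; infer_instance

-- ===== CLAIM (what is proved, stated in full; the proofs are below) =====
def Claim_equal_txt2mx : Prop := ∀ (text : String), Dom_txt2mx text → Spec_txt2mx text (txt2mx text)

-- ===== LEMMAS AND PROOFS =====

-- A's value for logical byte position b*16+j (the byte, or the pad value past the text).
def pvVal (m : List Int) (b j : Nat) : Int :=
  if b * 16 + j < m.length then m.getD (b * 16 + j) 0 else (16 : Int) - (m.length : Int) % 16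

-- B's padded chunk number b.
def pvChunk (m : List Int) (b : Nat) : List Int :=
  let c0 := (m.drop (b * 16)).take 16
  if c0.length < 16 then c0 ++ List.replicate (16 - c0.length) ((16 - c0.length : Nat) : Int) else c0

-- The inner write loop only touches row i: pull it out as a fold on that row.
theorem pv_inner_extract (l : List Nat) (i : Nat) (mat : List (List Int))
    (g : Nat → List Int → List Int) (hi : i < mat.length) :
    l.foldl (fun mat j => mat.set i (g j (mat.getD i []))) mat
      = mat.set i (l.foldl (fun row j => g j row) (mat.getD i [])) := by
  induction l generalizing mat with
  | nil =>
    simp only [List.foldl_nil]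
    rw [List.getD_eq_getElem _ _ hi, List.set_getElem_self]
  | cons a l ih =>
    simp only [List.foldl_cons]
    rw [ih _ (by simpa using hi)]
    rw [List.set_set]
    congr 1
    rw [List.getD_eq_getElem _ _ (by simpa using hi), List.getElem_set_self]

-- The outer loop processed up to k: rows below k are finished, the rest untouched.
theorem pv_outer (g : Nat → Nat → List Int → List Int) (l : List Nat) (r0 : List Int) (N : Nat) :
    ∀ k, k ≤ N →
    (List.range k).foldl
        (fun mat i => l.foldl (fun mat j => mat.set i (g i j (mat.getD i []))) mat)
        ((List.range N).map (fun _ => r0))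
      = (List.range N).map (fun i => if i < k then l.foldl (fun row j => g i j row) r0 else r0) := by
  intro k
  induction k with
  | zero => intro _; simp
  | succ k ih =>
    intro hk
    rw [List.range_succ, List.foldl_append, ih (by omega)]
    have hklen : k < ((List.range N).map
        (fun i => if i < k then l.foldl (fun row j => g i j row) r0 else r0)).length := by
      simpa using (by omega : k < N)
    simp only [List.foldl_cons, List.foldl_nil]
    rw [pv_inner_extract l k _ (g k) hklen]
    have hget : ((List.range N).map
        (fun i => if i < k then l.foldl (fun row j => g i j row) r0 else r0)).getD k [] = r0 := by
      rw [List.getD_eq_getElem _ _ hklen]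
      simp [List.getElem_map, List.getElem_range]
    rw [hget]
    apply List.ext_getElem
    · simp
    · intro m hm hm'
      simp only [List.length_set, List.length_map, List.length_range] at hm
      rw [List.getElem_set]
      simp only [List.getElem_map, List.getElem_range]
      split_ifs with h1 <;> first
        | rfl
        | omega
        | (subst h1; rfl)

-- Reading the padded chunk at position j is A's value for byte b*16+j.
theorem pv_chunk_getD (m : List Int) (b j : Nat) (hb : b < (m.length + 15) / 16) (hj : j < 16) :
    (pvChunk m b).getD j 0 = pvVal m b j := by
  have hlt : b * 16 < m.length := by omega
  have hc0 : ((m.drop (b * 16)).take 16).length = min 16 (m.length - b * 16) := by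
    simp [List.length_take, List.length_drop]
  simp only [pvChunk, pvVal]
  by_cases hfull : 16 ≤ m.length - b * 16
  · rw [if_neg (by omega)]
    rw [List.getD_eq_getElem?_getD, List.getElem?_take, if_pos hj, List.getElem?_drop]
    rw [if_pos (by omega)]
    rw [List.getD_eq_getElem?_getD, Nat.add_comm (b * 16) j]
  · have hr : 1 ≤ m.length - b * 16 := by omega
    rw [if_pos (by omega)]
    have hlen : ((m.drop (b * 16)).take 16).length = m.length - b * 16 := by omega
    by_cases hjr : j < m.length - b * 16
    · rw [List.getD_eq_getElem?_getD, List.getElem?_append_left (by omega),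
        List.getElem?_take, if_pos hj, List.getElem?_drop]
      rw [if_pos (by omega), List.getD_eq_getElem?_getD, Nat.add_comm (b * 16) j]
    · rw [List.getD_eq_getElem?_getD, List.getElem?_append_right (by omega)]
      rw [if_neg (by omega)]
      rw [hlen, List.getElem?_replicate]
      rw [if_pos (by omega)]
      have hmod : m.length % 16 = m.length - b * 16 := by omega
      simp only [Option.getD_some]
      have hcast : ((m.length : Int)) % 16 = ((m.length % 16 : Nat) : Int) := by push_cast; rfl
      rw [hcast, hmod]
      omega

-- A's inner loop on one row, unrolled: the row in B's column-major read-out order.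
theorem pv_A_row (m : List Int) (b : Nat) :
    (List.range 16).foldl (fun row j => row.set ((j * 4) % 16 + j / 4) (pvVal m b j))
        (List.replicate 16 (0 : Int))
      = [pvVal m b 0, pvVal m b 4, pvVal m b 8, pvVal m b 12,
         pvVal m b 1, pvVal m b 5, pvVal m b 9, pvVal m b 13,
         pvVal m b 2, pvVal m b 6, pvVal m b 10, pvVal m b 14,
         pvVal m b 3, pvVal m b 7, pvVal m b 11, pvVal m b 15] := by
  rw [(by rfl : List.range 16 = [0,1,2,3,4,5,6,7,8,9,10,11,12,13,14,15])]
  simp only [List.foldl_cons, List.foldl_nil]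
  norm_num [List.set, List.replicate]

-- B's block for chunk b, unrolled, as the same list of values.
theorem pv_B_row (m : List Int) (b : Nat) (hb : b < (m.length + 15) / 16) :
    (List.range 4).flatMap (fun c =>
      ([PySem.List.slice (pvChunk m b) (some 0) (some 4),
        PySem.List.slice (pvChunk m b) (some 4) (some 8),
        PySem.List.slice (pvChunk m b) (some 8) (some 12),
        PySem.List.slice (pvChunk m b) (some 12) (some 16)]).map (fun row => row.getD c 0))
      = [pvVal m b 0, pvVal m b 4, pvVal m b 8, pvVal m b 12,
         pvVal m b 1, pvVal m b 5, pvVal m b 9, pvVal m b 13,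
         pvVal m b 2, pvVal m b 6, pvVal m b 10, pvVal m b 14,
         pvVal m b 3, pvVal m b 7, pvVal m b 11, pvVal m b 15] := by
  have hs : ∀ (a n : Nat), PySem.List.slice (pvChunk m b) (some (a : Int)) (some ((a : Int) + (n : Int)))
      = ((pvChunk m b).drop a).take n := PySem.List.slice_natCast_add (pvChunk m b)
  have h48 := hs 4 4; have h812 := hs 8 4; have h1216 := hs 12 4
  norm_num at h48 h812 h1216
  have h04 : PySem.List.slice (pvChunk m b) none (some (4 : Int)) = ((pvChunk m b).drop 0).take 4 := by
    rw [PySem.List.slice_to _ (by norm_num), List.drop_zero]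
    rfl
  rw [(by rfl : List.range 4 = [0,1,2,3])]
  simp only [List.flatMap_cons, List.flatMap_nil, List.map_cons, List.map_nil, List.append_nil,
    List.cons_append, List.nil_append, PySem.List.slice_zero_start, h04, h48, h812, h1216]
  have hg : ∀ (a c : Nat), c < 4 →
      (((pvChunk m b).drop a).take 4).getD c 0 = (pvChunk m b).getD (a + c) 0 := by
    intro a c hc
    rw [List.getD_eq_getElem?_getD, List.getElem?_take, if_pos hc, List.getElem?_drop,
      List.getD_eq_getElem?_getD]
  simp only [hg 0 0 (by omega), hg 0 1 (by omega), hg 0 2 (by omega), hg 0 3 (by omega),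
    hg 4 0 (by omega), hg 4 1 (by omega), hg 4 2 (by omega), hg 4 3 (by omega),
    hg 8 0 (by omega), hg 8 1 (by omega), hg 8 2 (by omega), hg 8 3 (by omega),
    hg 12 0 (by omega), hg 12 1 (by omega), hg 12 2 (by omega), hg 12 3 (by omega)]
  norm_num
  exact ⟨pv_chunk_getD m b 0 hb (by omega), pv_chunk_getD m b 4 hb (by omega),
    pv_chunk_getD m b 8 hb (by omega), pv_chunk_getD m b 12 hb (by omega),
    pv_chunk_getD m b 1 hb (by omega), pv_chunk_getD m b 5 hb (by omega),
    pv_chunk_getD m b 9 hb (by omega), pv_chunk_getD m b 13 hb (by omega),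
    pv_chunk_getD m b 2 hb (by omega), pv_chunk_getD m b 6 hb (by omega),
    pv_chunk_getD m b 10 hb (by omega), pv_chunk_getD m b 14 hb (by omega),
    pv_chunk_getD m b 3 hb (by omega), pv_chunk_getD m b 7 hb (by omega),
    pv_chunk_getD m b 11 hb (by omega), pv_chunk_getD m b 15 hb (by omega)⟩

-- ===== VERDICT (by name: the statement is the Claim_ definition above) =====
theorem txt2mx_spec : Claim_equal_txt2mx := by
  intro text _hDom
  show txt2mx text = txt2mx_alt text
  simp only [txt2mx, txt2mx_alt]
  generalize (text.toList.map (fun c => ((c.toNat : Nat) : Int))) = m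
  rw [pv_outer (fun i j row => row.set ((j * 4) % 16 + j / 4)
        (if i * 16 + j < m.length then m.getD (i * 16 + j) 0 else (16 : Int) - (m.length : Int) % 16))
      (List.range 16) (List.replicate 16 0) ((m.length + 15) / 16) ((m.length + 15) / 16) (le_refl _)]
  rw [PySem.List.pyRange_of_pos 0 (m.length : Int) (by norm_num : (0:Int) < 16)]
  have hK : (if (0:Int) < (m.length : Int) then (((m.length : Int) - 0 + 16 - 1) / 16).toNat else 0)
      = (m.length + 15) / 16 := by
    split_ifs with h
    · omega
    · omega
  rw [hK, PySem.List.foldl_append_singleton_eq_map, List.nil_append, List.map_map]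
  apply List.map_congr_left
  intro b hbmem
  have hbN : b < (m.length + 15) / 16 := List.mem_range.mp hbmem
  rw [if_pos hbN]
  simp only [Function.comp_apply]
  have harg : (0 : Int) + 16 * (b : Int) = ((b * 16 : Nat) : Int) := by push_cast; ring
  rw [harg]
  rw [show ((b * 16 : Nat) : Int) + 16 = ((b * 16 : Nat) : Int) + ((16 : Nat) : Int) by norm_num]
  rw [PySem.List.slice_natCast_add m (b * 16) 16]
  rw [show (if ((m.drop (b * 16)).take 16).length < 16 then
        (m.drop (b * 16)).take 16 ++
          List.replicate (16 - ((m.drop (b * 16)).take 16).length)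
            ((16 - ((m.drop (b * 16)).take 16).length : Nat) : Int)
      else (m.drop (b * 16)).take 16) = pvChunk m b from rfl]
  rw [pv_B_row m b hbN]
  exact pv_A_row m b
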